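-- pv_equiv track=rewrite | github.com/dipalisikand1965-blip/TDB1 | backend/routes/icon_state_routes.py | compute_icon_state
-- ===== SOURCE A (Python) =====
-- from typing import Optional, Dict, Any, List
--
-- def compute_icon_state(tab: str, counts: Dict, is_active: bool = False) -> str:
--     """
--     Compute icon state (OFF/ON/PULSE) based on counts.
--
--     Rules:
--     - OFF: No activity (all counts are 0)
--     - ON: Has activity but nothing urgent
--     - PULSE: Needs immediate attention (override prevents pulse if tab is active)
--
--     Active tab override: If tab is currently active, never PULSE (user is already there)
--     """
--     # Active tab override
--     if is_active:
--         # Still show ON if there's activity, but never PULSE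
--         total = sum(v for k, v in counts.items() if isinstance(v, int) and not k.startswith("_"))
--         return "ON" if total > 0 else "OFF"
--
--     # Tab-specific PULSE rules
--     if tab == "services":
--         if counts.get("awaiting_you", 0) > 0:
--             return "PULSE"
--         elif counts.get("active_tickets", 0) > 0:
--             return "ON"
--         return "OFF"
--
--     elif tab == "today":
--         if counts.get("urgent", 0) > 0 or counts.get("due_today", 0) > 0:
--             return "PULSE"
--         elif counts.get("upcoming", 0) > 0:
--             return "ON"
--         return "OFF"
--
--     elif tab == "concierge":
--         if counts.get("unread_replies", 0) > 0:
--             return "PULSE"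
--         elif counts.get("open_threads", 0) > 0:
--             return "ON"
--         return "OFF"
--
--     elif tab == "picks":
--         if counts.get("new_picks_since_last_view", 0) > 0:
--             return "PULSE"
--         elif counts.get("material_change", 0) > 0:
--             return "ON"
--         return "OFF"
--
--     elif tab == "learn":
--         if counts.get("pending_insights", 0) > 0:
--             return "PULSE"
--         elif counts.get("learned_facts", 0) > 0:
--             return "ON"
--         return "OFF"
--
--     elif tab == "mojo":
--         if counts.get("critical_fields_missing", 0) > 0:
--             return "PULSE"
--         elif counts.get("soul_score", 0) > 50:
--             return "ON"
--         return "OFF"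
--
--     return "OFF"
-- ===== SOURCE B (Python) =====
-- # (tab, key) -> (severity level when count exceeds threshold, threshold)
-- _KEY_ROLE = {
--     ("services", "awaiting_you"): (2, 0),
--     ("services", "active_tickets"): (1, 0),
--     ("today", "urgent"): (2, 0),
--     ("today", "due_today"): (2, 0),
--     ("today", "upcoming"): (1, 0),
--     ("concierge", "unread_replies"): (2, 0),
--     ("concierge", "open_threads"): (1, 0),
--     ("picks", "new_picks_since_last_view"): (2, 0),
--     ("picks", "material_change"): (1, 0),
--     ("learn", "pending_insights"): (2, 0),
--     ("learn", "learned_facts"): (1, 0),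
--     ("mojo", "critical_fields_missing"): (2, 0),
--     ("mojo", "soul_score"): (1, 50),
-- }
--
-- def compute_icon_state(tab: str, counts: dict, is_active: bool = False) -> str:
--     if is_active:
--         total = sum(v for k, v in counts.items() if isinstance(v, int) and not k.startswith("_"))
--         return "ON" if total > 0 else "OFF"
--     severity = 0
--     for key, value in counts.items():
--         role = _KEY_ROLE.get((tab, key))
--         if role is not None and value > role[1]:
--             severity = max(severity, role[0])
--     if severity == 2:
--         return "PULSE"
--     if severity == 1:
--         return "ON"
--     return "OFF"
-- ===== Notes on version B (the rewrite author's own statement) =====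
-- stated objective: alternative
-- what changed: B replaces A's per-tab elif chain of counts.get lookups with a single pass over the counts entries themselves, classifying each (key, value) entry through a (tab, key)->(level, threshold) role map and keeping the maximum severity (0=OFF, 1=ON, 2=PULSE).
import Mathlib
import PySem

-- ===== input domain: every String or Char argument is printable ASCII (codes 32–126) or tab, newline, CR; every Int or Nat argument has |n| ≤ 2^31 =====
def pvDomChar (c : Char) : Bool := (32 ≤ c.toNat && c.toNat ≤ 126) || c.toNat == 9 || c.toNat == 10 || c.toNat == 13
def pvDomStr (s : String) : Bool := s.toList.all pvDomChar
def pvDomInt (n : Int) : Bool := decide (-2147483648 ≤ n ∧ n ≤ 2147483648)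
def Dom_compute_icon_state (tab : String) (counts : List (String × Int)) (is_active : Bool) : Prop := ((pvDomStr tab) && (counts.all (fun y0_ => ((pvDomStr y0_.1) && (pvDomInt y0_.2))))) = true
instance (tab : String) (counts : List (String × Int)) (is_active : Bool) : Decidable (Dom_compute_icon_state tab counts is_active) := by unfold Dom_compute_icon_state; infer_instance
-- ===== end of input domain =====

-- B scans the counts entries once, classifying each (key, value) through a (tab, key)->(level, threshold) role map and keeping the maximum severity, instead of A's per-tab elif chain of counts.get lookups; alternative decomposition, same behaviour on dict inputs.


-- ===== PORT A =====
-- counts.get(k, 0) on the dict (association list, first match)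
def pvGet0 (counts : List (String × Int)) (k : String) : Int :=
  (PySem.Dict.mk counts).getD k 0

def compute_icon_state (tab : String) (counts : List (String × Int)) (is_active : Bool) : String :=
  if is_active then
    -- sum(v for k, v in counts.items() if isinstance(v, int) and not k.startswith("_"))
    let total := counts.foldl (fun s kv => if PySem.Str.startswith kv.1 "_" then s else s + kv.2) 0
    if total > 0 then "ON" else "OFF"
  else if tab = "services" then
    if pvGet0 counts "awaiting_you" > 0 then "PULSE"
    else if pvGet0 counts "active_tickets" > 0 then "ON"
    else "OFF"
  else if tab = "today" then
    if pvGet0 counts "urgent" > 0 ∨ pvGet0 counts "due_today" > 0 then "PULSE"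
    else if pvGet0 counts "upcoming" > 0 then "ON"
    else "OFF"
  else if tab = "concierge" then
    if pvGet0 counts "unread_replies" > 0 then "PULSE"
    else if pvGet0 counts "open_threads" > 0 then "ON"
    else "OFF"
  else if tab = "picks" then
    if pvGet0 counts "new_picks_since_last_view" > 0 then "PULSE"
    else if pvGet0 counts "material_change" > 0 then "ON"
    else "OFF"
  else if tab = "learn" then
    if pvGet0 counts "pending_insights" > 0 then "PULSE"
    else if pvGet0 counts "learned_facts" > 0 then "ON"
    else "OFF"
  else if tab = "mojo" then
    if pvGet0 counts "critical_fields_missing" > 0 then "PULSE"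
    else if pvGet0 counts "soul_score" > 50 then "ON"
    else "OFF"
  else "OFF"

-- ===== PORT B =====
-- the module-level map _KEY_ROLE of Source B: (tab, key) -> (severity level, threshold)
def pvKeyRole : List ((String × String) × (Nat × Int)) :=
  [ (("services", "awaiting_you"), (2, 0)),
    (("services", "active_tickets"), (1, 0)),
    (("today", "urgent"), (2, 0)),
    (("today", "due_today"), (2, 0)),
    (("today", "upcoming"), (1, 0)),
    (("concierge", "unread_replies"), (2, 0)),
    (("concierge", "open_threads"), (1, 0)),
    (("picks", "new_picks_since_last_view"), (2, 0)),
    (("picks", "material_change"), (1, 0)),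
    (("learn", "pending_insights"), (2, 0)),
    (("learn", "learned_facts"), (1, 0)),
    (("mojo", "critical_fields_missing"), (2, 0)),
    (("mojo", "soul_score"), (1, 50)) ]

def compute_icon_state_alt (tab : String) (counts : List (String × Int)) (is_active : Bool) : String :=
  if is_active then
    let total := counts.foldl (fun s kv => if PySem.Str.startswith kv.1 "_" then s else s + kv.2) 0
    if total > 0 then "ON" else "OFF"
  else
    -- severity loop: for key, value in counts.items(): role = _KEY_ROLE.get((tab, key)); …
    let severity := counts.foldl (fun s kv =>
      match pvKeyRole.find? (fun p => p.1 == (tab, kv.1)) with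
      | none => s
      | some (_, lvl, th) => if kv.2 > th then max s lvl else s) 0
    if severity = 2 then "PULSE"
    else if severity = 1 then "ON"
    else "OFF"

-- ===== PRECONDITION & SPEC =====
-- Pre_ requires pairwise-distinct keys — every Python dict satisfies this, so no Python input is excluded; it rules out
-- only association lists with duplicate keys, where A's first-match lookup vs B's full scan is an accidental corner.
def Pre_compute_icon_state (tab : String) (counts : List (String × Int)) (is_active : Bool) : Prop :=
  (counts.map Prod.fst).Nodup
instance (tab : String) (counts : List (String × Int)) (is_active : Bool) : Decidable (Pre_compute_icon_state tab counts is_active) := by unfold Pre_compute_icon_state; infer_instance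
def pvWitness_compute_icon_state : String × (List (String × Int)) × Bool :=
  ("mojo", [("critical_fields_missing", 0), ("soul_score", 60)], false)

def Spec_compute_icon_state (tab : String) (counts : List (String × Int)) (is_active : Bool) (out : String) : Prop := out = compute_icon_state_alt tab counts is_active
instance (tab : String) (counts : List (String × Int)) (is_active : Bool) (out : String) : Decidable (Spec_compute_icon_state tab counts is_active out) := by unfold Spec_compute_icon_state; infer_instance

-- ===== CLAIM =====
def Claim_equal_compute_icon_state : Prop := ∀ (tab : String) (counts : List (String × Int)) (is_active : Bool), Dom_compute_icon_state tab counts is_active → Pre_compute_icon_state tab counts is_active → Spec_compute_icon_state tab counts is_active (compute_icon_state tab counts is_active)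

-- ===== LEMMAS AND PROOFS =====

-- severity of one entry for a fixed tab (proof-side name for B's loop body)
def sevOf (tab : String) (kv : String × Int) : Nat :=
  match pvKeyRole.find? (fun p => p.1 == (tab, kv.1)) with
  | none => 0
  | some (_, lvl, th) => if kv.2 > th then lvl else 0

lemma pbeq (a b c d : String) : ((a, b) == (c, d)) = (a == c && b == d) := rfl

lemma foldl_body_eq_sev (tab : String) (l : List (String × Int)) (s : Nat) :
    l.foldl (fun s kv =>
      match pvKeyRole.find? (fun p => p.1 == (tab, kv.1)) with
      | none => s
      | some (_, lvl, th) => if kv.2 > th then max s lvl else s) s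
    = l.foldl (fun s kv => max s (sevOf tab kv)) s := by
  induction l generalizing s with
  | nil => rfl
  | cons kv t ih =>
    simp only [List.foldl_cons]
    rw [ih]
    congr 1
    unfold sevOf
    cases h : pvKeyRole.find? (fun p => p.1 == (tab, kv.1)) with
    | none => simp
    | some r =>
      obtain ⟨_, lvl, th⟩ := r
      by_cases hv : kv.2 > th <;> simp [hv]

lemma sevOf_le (tab : String) (kv : String × Int) : sevOf tab kv ≤ 2 := by
  unfold sevOf
  cases h : pvKeyRole.find? (fun p => p.1 == (tab, kv.1)) with
  | none => simp
  | some r =>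
    have hm := List.mem_of_find?_eq_some h
    obtain ⟨_, lvl, th⟩ := r
    have : lvl ≤ 2 := by fin_cases hm <;> simp
    by_cases hv : kv.2 > th <;> simp [hv] <;> omega

-- max-severity fold characterised by which levels occur
lemma foldl_max_char (f : String × Int → Nat) (hf : ∀ p, f p ≤ 2) (l : List (String × Int)) :
    l.foldl (fun s p => max s (f p)) 0
    = (if ∃ p ∈ l, f p = 2 then 2 else if ∃ p ∈ l, f p = 1 then 1 else 0) := by
  induction l using List.reverseRecOn with
  | nil => simp
  | append_singleton t a ih =>
    rw [List.foldl_append]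
    have hs2 : (∃ p ∈ t ++ [a], f p = 2) ↔ (∃ p ∈ t, f p = 2) ∨ f a = 2 := by
      simp [List.mem_append, or_and_right, exists_or]
    have hs1 : (∃ p ∈ t ++ [a], f p = 1) ↔ (∃ p ∈ t, f p = 1) ∨ f a = 1 := by
      simp [List.mem_append, or_and_right, exists_or]
    simp only [List.foldl_cons, List.foldl_nil, ih, hs2, hs1]
    have ha := hf a
    by_cases h2 : ∃ p ∈ t, f p = 2 <;> by_cases h1 : ∃ p ∈ t, f p = 1 <;>
      by_cases ha2 : f a = 2 <;> by_cases ha1 : f a = 1 <;>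
      simp [h2, h1, ha2, ha1] <;> omega

-- first-match get on a nodup-keyed list, compared with a nonnegative threshold
lemma get0_gt_iff (counts : List (String × Int)) (k : String) (th : Int)
    (hnd : (counts.map Prod.fst).Nodup) (hth : 0 ≤ th) :
    th < pvGet0 counts k ↔ ∃ v, (k, v) ∈ counts ∧ th < v := by
  have hkeys : (PySem.Dict.mk counts).keys.Nodup := by
    simpa [PySem.Dict.keys] using hnd
  unfold pvGet0
  rw [PySem.Dict.getD_eq_get?_getD]
  cases h : (PySem.Dict.mk counts).get? k with
  | none =>
    simp only [Option.getD_none]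
    constructor
    · intro hlt; omega
    · rintro ⟨v, hv, _⟩
      have : (PySem.Dict.mk counts).get? k = some v :=
        PySem.Dict.get?_of_mem_items _ (by simpa [PySem.Dict.items] using hv) hkeys
      simp [h] at this
  | some v =>
    simp only [Option.getD_some]
    constructor
    · intro hlt
      exact ⟨v, by simpa [PySem.Dict.items] using PySem.Dict.mem_items_of_get?_eq_some _ h, hlt⟩
    · rintro ⟨w, hw, hgt⟩
      have : (PySem.Dict.mk counts).get? k = some w :=
        PySem.Dict.get?_of_mem_items _ (by simpa [PySem.Dict.items] using hw) hkeys
      rw [h] at this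
      injection this with e
      omega

-- bridge: "some entry reaches level lvl" ↔ "counts.get(k0, 0) > th", for a single-key level
lemma exists_sev_single (counts : List (String × Int)) (hnd : (counts.map Prod.fst).Nodup)
    (tab k0 : String) (lvl : Nat) (th : Int) (hth : 0 ≤ th)
    (hchar : ∀ p : String × Int, sevOf tab p = lvl ↔ (p.1 = k0 ∧ th < p.2)) :
    (∃ p ∈ counts, sevOf tab p = lvl) ↔ th < pvGet0 counts k0 := by
  rw [get0_gt_iff counts k0 th hnd hth]
  constructor
  · rintro ⟨⟨k, v⟩, hm, hs⟩
    obtain ⟨hk, hv⟩ := (hchar _).1 hs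
    exact ⟨v, by simpa [← hk] using hm, hv⟩
  · rintro ⟨v, hm, hv⟩
    exact ⟨(k0, v), hm, (hchar _).2 ⟨rfl, hv⟩⟩

-- bridge for today's two OR-ed pulse keys
lemma exists_sev_pair (counts : List (String × Int)) (hnd : (counts.map Prod.fst).Nodup)
    (tab k1 k2 : String) (lvl : Nat)
    (hchar : ∀ p : String × Int, sevOf tab p = lvl ↔ ((p.1 = k1 ∨ p.1 = k2) ∧ 0 < p.2)) :
    (∃ p ∈ counts, sevOf tab p = lvl) ↔ (0 < pvGet0 counts k1 ∨ 0 < pvGet0 counts k2) := by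
  rw [get0_gt_iff counts k1 0 hnd le_rfl, get0_gt_iff counts k2 0 hnd le_rfl]
  constructor
  · rintro ⟨⟨k, v⟩, hm, hs⟩
    obtain ⟨hk | hk, hv⟩ := (hchar _).1 hs
    · exact Or.inl ⟨v, by simpa [← hk] using hm, hv⟩
    · exact Or.inr ⟨v, by simpa [← hk] using hm, hv⟩
  · rintro (⟨v, hm, hv⟩ | ⟨v, hm, hv⟩)
    · exact ⟨(k1, v), hm, (hchar _).2 ⟨Or.inl rfl, hv⟩⟩
    · exact ⟨(k2, v), hm, (hchar _).2 ⟨Or.inr rfl, hv⟩⟩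

-- per-tab closed forms of sevOf
lemma sev_services2 (p : String × Int) : sevOf "services" p = 2 ↔ (p.1 = "awaiting_you" ∧ 0 < p.2) := by
  obtain ⟨k, v⟩ := p
  simp [sevOf, pvKeyRole, List.find?, pbeq]
  cases h1 : ("awaiting_you" == k) <;> cases h2 : ("active_tickets" == k) <;>
    simp_all <;> try subst k
  all_goals try split_ifs
  all_goals try simp_all
  all_goals try (rintro rfl; simp_all)

lemma sev_services1 (p : String × Int) : sevOf "services" p = 1 ↔ (p.1 = "active_tickets" ∧ 0 < p.2) := by
  obtain ⟨k, v⟩ := p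
  simp [sevOf, pvKeyRole, List.find?, pbeq]
  cases h1 : ("awaiting_you" == k) <;> cases h2 : ("active_tickets" == k) <;>
    simp_all <;> try subst k
  all_goals try split_ifs
  all_goals try simp_all
  all_goals try (rintro rfl; simp_all)

lemma sev_today2 (p : String × Int) : sevOf "today" p = 2 ↔ ((p.1 = "urgent" ∨ p.1 = "due_today") ∧ 0 < p.2) := by
  obtain ⟨k, v⟩ := p
  simp [sevOf, pvKeyRole, List.find?, pbeq]
  cases h1 : ("urgent" == k) <;> cases h2 : ("due_today" == k) <;> cases h3 : ("upcoming" == k) <;>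
    simp_all <;> try subst k
  all_goals try split_ifs
  all_goals try simp_all
  all_goals try (rintro (rfl | rfl) <;> simp_all)

lemma sev_today1 (p : String × Int) : sevOf "today" p = 1 ↔ (p.1 = "upcoming" ∧ 0 < p.2) := by
  obtain ⟨k, v⟩ := p
  simp [sevOf, pvKeyRole, List.find?, pbeq]
  cases h1 : ("urgent" == k) <;> cases h2 : ("due_today" == k) <;> cases h3 : ("upcoming" == k) <;>
    simp_all <;> try subst k
  all_goals try split_ifs
  all_goals try simp_all
  all_goals try (rintro rfl; simp_all)

lemma sev_concierge2 (p : String × Int) : sevOf "concierge" p = 2 ↔ (p.1 = "unread_replies" ∧ 0 < p.2) := by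
  obtain ⟨k, v⟩ := p
  simp [sevOf, pvKeyRole, List.find?, pbeq]
  cases h1 : ("unread_replies" == k) <;> cases h2 : ("open_threads" == k) <;>
    simp_all <;> try subst k
  all_goals try split_ifs
  all_goals try simp_all
  all_goals try (rintro rfl; simp_all)

lemma sev_concierge1 (p : String × Int) : sevOf "concierge" p = 1 ↔ (p.1 = "open_threads" ∧ 0 < p.2) := by
  obtain ⟨k, v⟩ := p
  simp [sevOf, pvKeyRole, List.find?, pbeq]
  cases h1 : ("unread_replies" == k) <;> cases h2 : ("open_threads" == k) <;>
    simp_all <;> try subst k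
  all_goals try split_ifs
  all_goals try simp_all
  all_goals try (rintro rfl; simp_all)

lemma sev_picks2 (p : String × Int) : sevOf "picks" p = 2 ↔ (p.1 = "new_picks_since_last_view" ∧ 0 < p.2) := by
  obtain ⟨k, v⟩ := p
  simp [sevOf, pvKeyRole, List.find?, pbeq]
  cases h1 : ("new_picks_since_last_view" == k) <;> cases h2 : ("material_change" == k) <;>
    simp_all <;> try subst k
  all_goals try split_ifs
  all_goals try simp_all
  all_goals try (rintro rfl; simp_all)

lemma sev_picks1 (p : String × Int) : sevOf "picks" p = 1 ↔ (p.1 = "material_change" ∧ 0 < p.2) := by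
  obtain ⟨k, v⟩ := p
  simp [sevOf, pvKeyRole, List.find?, pbeq]
  cases h1 : ("new_picks_since_last_view" == k) <;> cases h2 : ("material_change" == k) <;>
    simp_all <;> try subst k
  all_goals try split_ifs
  all_goals try simp_all
  all_goals try (rintro rfl; simp_all)

lemma sev_learn2 (p : String × Int) : sevOf "learn" p = 2 ↔ (p.1 = "pending_insights" ∧ 0 < p.2) := by
  obtain ⟨k, v⟩ := p
  simp [sevOf, pvKeyRole, List.find?, pbeq]
  cases h1 : ("pending_insights" == k) <;> cases h2 : ("learned_facts" == k) <;>
    simp_all <;> try subst k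
  all_goals try split_ifs
  all_goals try simp_all
  all_goals try (rintro rfl; simp_all)

lemma sev_learn1 (p : String × Int) : sevOf "learn" p = 1 ↔ (p.1 = "learned_facts" ∧ 0 < p.2) := by
  obtain ⟨k, v⟩ := p
  simp [sevOf, pvKeyRole, List.find?, pbeq]
  cases h1 : ("pending_insights" == k) <;> cases h2 : ("learned_facts" == k) <;>
    simp_all <;> try subst k
  all_goals try split_ifs
  all_goals try simp_all
  all_goals try (rintro rfl; simp_all)

lemma sev_mojo2 (p : String × Int) : sevOf "mojo" p = 2 ↔ (p.1 = "critical_fields_missing" ∧ 0 < p.2) := by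
  obtain ⟨k, v⟩ := p
  simp [sevOf, pvKeyRole, List.find?, pbeq]
  cases h1 : ("critical_fields_missing" == k) <;> cases h2 : ("soul_score" == k) <;>
    simp_all <;> try subst k
  all_goals try split_ifs
  all_goals try simp_all
  all_goals try (rintro rfl; simp_all)

lemma sev_mojo1 (p : String × Int) : sevOf "mojo" p = 1 ↔ (p.1 = "soul_score" ∧ 50 < p.2) := by
  obtain ⟨k, v⟩ := p
  simp [sevOf, pvKeyRole, List.find?, pbeq]
  cases h1 : ("critical_fields_missing" == k) <;> cases h2 : ("soul_score" == k) <;>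
    simp_all <;> try subst k
  all_goals try split_ifs
  all_goals try simp_all
  all_goals try (rintro rfl; simp_all)

lemma sev_other (tab : String) (p : String × Int)
    (h1 : tab ≠ "services") (h2 : tab ≠ "today") (h3 : tab ≠ "concierge")
    (h4 : tab ≠ "picks") (h5 : tab ≠ "learn") (h6 : tab ≠ "mojo") :
    sevOf tab p = 0 := by
  obtain ⟨k, v⟩ := p
  have e1 : ("services" == tab) = false := by simp [Ne.symm h1]
  have e2 : ("today" == tab) = false := by simp [Ne.symm h2]
  have e3 : ("concierge" == tab) = false := by simp [Ne.symm h3]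
  have e4 : ("picks" == tab) = false := by simp [Ne.symm h4]
  have e5 : ("learn" == tab) = false := by simp [Ne.symm h5]
  have e6 : ("mojo" == tab) = false := by simp [Ne.symm h6]
  simp [sevOf, pvKeyRole, List.find?, pbeq, e1, e2, e3, e4, e5, e6]

theorem compute_icon_state_spec : Claim_equal_compute_icon_state := by
  intro tab counts is_active _ hpre
  unfold Spec_compute_icon_state compute_icon_state compute_icon_state_alt
  cases is_active with
  | true => simp
  | false =>
    simp only [Bool.false_eq_true, if_false]
    rw [foldl_body_eq_sev, foldl_max_char (sevOf tab) (sevOf_le tab)]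
    by_cases h1 : tab = "services"
    · subst h1
      simp only [exists_sev_single counts hpre _ _ 2 0 le_rfl sev_services2,
          exists_sev_single counts hpre _ _ 1 0 le_rfl sev_services1]
      by_cases hA : 0 < pvGet0 counts "awaiting_you" <;>
        by_cases hB : 0 < pvGet0 counts "active_tickets" <;> simp [hA, hB]
    by_cases h2 : tab = "today"
    · subst h2
      simp only [exists_sev_pair counts hpre _ _ _ 2 sev_today2,
          exists_sev_single counts hpre _ _ 1 0 le_rfl sev_today1]
      by_cases hA : 0 < pvGet0 counts "urgent" <;>
        by_cases hB : 0 < pvGet0 counts "due_today" <;>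
        by_cases hC : 0 < pvGet0 counts "upcoming" <;> simp [hA, hB, hC]
    by_cases h3 : tab = "concierge"
    · subst h3
      simp only [exists_sev_single counts hpre _ _ 2 0 le_rfl sev_concierge2,
          exists_sev_single counts hpre _ _ 1 0 le_rfl sev_concierge1]
      by_cases hA : 0 < pvGet0 counts "unread_replies" <;>
        by_cases hB : 0 < pvGet0 counts "open_threads" <;> simp [hA, hB]
    by_cases h4 : tab = "picks"
    · subst h4
      simp only [exists_sev_single counts hpre _ _ 2 0 le_rfl sev_picks2,
          exists_sev_single counts hpre _ _ 1 0 le_rfl sev_picks1]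
      by_cases hA : 0 < pvGet0 counts "new_picks_since_last_view" <;>
        by_cases hB : 0 < pvGet0 counts "material_change" <;> simp [hA, hB]
    by_cases h5 : tab = "learn"
    · subst h5
      simp only [exists_sev_single counts hpre _ _ 2 0 le_rfl sev_learn2,
          exists_sev_single counts hpre _ _ 1 0 le_rfl sev_learn1]
      by_cases hA : 0 < pvGet0 counts "pending_insights" <;>
        by_cases hB : 0 < pvGet0 counts "learned_facts" <;> simp [hA, hB]
    by_cases h6 : tab = "mojo"
    · subst h6
      simp only [exists_sev_single counts hpre _ _ 2 0 le_rfl sev_mojo2,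
          exists_sev_single counts hpre _ _ 1 (50 : Int) (by norm_num) sev_mojo1]
      by_cases hA : 0 < pvGet0 counts "critical_fields_missing" <;>
        by_cases hB : 50 < pvGet0 counts "soul_score" <;> simp [hA, hB]
    · have hz : ∀ p ∈ counts, sevOf tab p ≠ 2 ∧ sevOf tab p ≠ 1 := by
        intro p _
        rw [sev_other tab p h1 h2 h3 h4 h5 h6]
        exact ⟨by omega, by omega⟩
      simp only [h1, h2, h3, h4, h5, h6, if_false]
      have e2 : ¬ ∃ p ∈ counts, sevOf tab p = 2 := by
        rintro ⟨p, hm, hp⟩; exact (hz p hm).1 hp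
      have e1 : ¬ ∃ p ∈ counts, sevOf tab p = 1 := by
        rintro ⟨p, hm, hp⟩; exact (hz p hm).2 hp
      simp [e2, e1]
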